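-- pv_equiv track=rewrite | github.com/prixedox/advent-of-code-2023 | 04/src/CompareHandler.py | get_points_per_game
-- ===== SOURCE A (Python) =====
-- def get_points_per_game(games_array):
--     games_points = []
--     for game_group in games_array:
--         points = 0
--         win_numbers, my_numbers = game_group
--         for win_number in win_numbers:
--             for my_number in my_numbers:
--                 if win_number == my_number:
--                     points *= 2
--                     if points == 0:
--                         points = 1
--         games_points.append(points)
--
--     return games_points
-- ===== SOURCE B (Python) =====
-- def get_points_per_game(games_array):
--     games_points = []
--     for win_numbers, my_numbers in games_array:
--         matches = sum(my_numbers.count(w) for w in win_numbers)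
--         games_points.append(2 ** (matches - 1) if matches else 0)
--     return games_points
-- ===== Notes on version B (the rewrite author's own statement) =====
-- stated objective: simpler
-- what changed: B separates counting from scoring: it sums per-game pair matches (my_numbers.count per winning number, duplicates preserved) and maps the total through the closed form 2**(matches-1), replacing A's fused incremental doubling with its in-loop 0-to-1 bootstrap; the counting runs in C-level list.count instead of interpreted nested loops.
import Mathlib
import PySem

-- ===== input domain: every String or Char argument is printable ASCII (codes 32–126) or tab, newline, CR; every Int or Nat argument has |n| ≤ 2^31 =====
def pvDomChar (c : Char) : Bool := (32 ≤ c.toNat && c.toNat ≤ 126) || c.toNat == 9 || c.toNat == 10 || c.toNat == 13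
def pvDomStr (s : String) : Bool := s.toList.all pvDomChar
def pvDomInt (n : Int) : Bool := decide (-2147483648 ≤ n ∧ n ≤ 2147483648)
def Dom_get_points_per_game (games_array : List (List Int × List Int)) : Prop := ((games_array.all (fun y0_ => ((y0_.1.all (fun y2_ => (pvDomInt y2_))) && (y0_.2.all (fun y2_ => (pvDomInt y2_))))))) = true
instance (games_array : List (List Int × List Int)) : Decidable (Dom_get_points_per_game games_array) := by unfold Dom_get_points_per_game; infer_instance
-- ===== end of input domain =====

-- B replaces A's fused incremental doubling (with its 0→1 bootstrap) by a separate
-- match count per game followed by the closed form 2^(matches-1); objective: simpler.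

-- ===== PORT A =====
def get_points_per_game (games_array : List (List Int × List Int)) : List Int :=
  games_array.foldl (fun games_points game_group =>
    let points : Int :=
      game_group.1.foldl (fun points win_number =>
        game_group.2.foldl (fun points my_number =>
          if win_number == my_number then
            let points := points * 2
            if points == 0 then 1 else points
          else points) points) 0
    games_points ++ [points]) []

-- ===== PORT B =====
def get_points_per_game_alt (games_array : List (List Int × List Int)) : List Int :=
  games_array.map (fun g =>
    let m_ : Nat := (g.1.map (fun w => g.2.count w)).sum
    if m_ ≠ 0 then (2 : Int) ^ (m_ - 1) else 0)

-- ===== PRECONDITION & SPEC =====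
def Spec_get_points_per_game (games_array : List (List Int × List Int)) (out : List Int) : Prop := out = get_points_per_game_alt games_array
instance (games_array : List (List Int × List Int)) (out : List Int) : Decidable (Spec_get_points_per_game games_array out) := by unfold Spec_get_points_per_game; infer_instance

-- ===== CLAIM (what is proved, stated in full; the proofs are below) =====
def Claim_equal_get_points_per_game : Prop := ∀ (games_array : List (List Int × List Int)), Dom_get_points_per_game games_array → Spec_get_points_per_game games_array (get_points_per_game games_array)

-- ===== LEMMAS AND PROOFS =====

-- A's points value after k matched pairs
def pvF (k : Nat) : Int := if k = 0 then 0 else (2 : Int) ^ (k - 1)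

theorem pvF_succ (k : Nat) :
    (if pvF k * 2 == 0 then (1 : Int) else pvF k * 2) = pvF (k + 1) := by
  cases k with
  | zero => simp [pvF]
  | succ j =>
      simp only [pvF, Nat.succ_ne_zero, if_false, Nat.add_sub_cancel]
      have h : (2 : Int) ^ j * 2 = 2 ^ (j + 1) := by ring
      have hne : (2 : Int) ^ j * 2 ≠ 0 := by positivity
      simp [h]

theorem inner_loop (w : Int) (my : List Int) (k : Nat) :
    my.foldl (fun points my_number =>
      if w == my_number then
        let points := points * 2
        if points == 0 then 1 else points
      else points) (pvF k) = pvF (k + my.count w) := by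
  induction my generalizing k with
  | nil => simp
  | cons m rest ih =>
      by_cases h : w = m
      · subst h
        simp only [List.foldl_cons, beq_self_eq_true, if_true]
        rw [pvF_succ, ih]
        simp
        ring_nf
      · have hb : (w == m) = false := by simp [h]
        simp only [List.foldl_cons, hb, Bool.false_eq_true, if_false]
        rw [ih]
        simp [Ne.symm h]

theorem outer_loop (wins : List Int) (my : List Int) (k : Nat) :
    wins.foldl (fun points win_number =>
      my.foldl (fun points my_number =>
        if win_number == my_number then
          let points := points * 2
          if points == 0 then 1 else points
        else points) points) (pvF k)
    = pvF (k + (wins.map (fun w => my.count w)).sum) := by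
  induction wins generalizing k with
  | nil => simp
  | cons w rest ih =>
      simp only [List.foldl_cons]
      rw [inner_loop, ih]
      simp [Nat.add_assoc]

theorem foldl_append_map (l : List (List Int × List Int)) (acc : List Int)
    (h : List Int × List Int → Int) :
    l.foldl (fun a g => a ++ [h g]) acc = acc ++ l.map h := by
  induction l generalizing acc with
  | nil => simp
  | cons g rest ih => simp [ih]

-- ===== VERDICT (by name: the statement is the Claim_ definition above) =====
theorem get_points_per_game_spec : Claim_equal_get_points_per_game := by
  intro games_array _
  unfold Spec_get_points_per_game get_points_per_game get_points_per_game_alt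
  rw [foldl_append_map]
  simp only [List.nil_append]
  apply List.map_congr_left
  intro g _
  have := outer_loop g.1 g.2 0
  simpa [pvF] using this
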